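-- pv_equiv track=rewrite | github.com/Devin-Diaz/Egoist-Engine | python_data_scraping/python_scripts/player_stat_scraper.py | parse_player_former_teams
-- ===== SOURCE A (Python) =====
-- def parse_player_former_teams(former_team_text: str) -> set[str]:
--     former_teams = set()
--     split_by_bracket_arr = former_team_text.split(']')
--     for entry in split_by_bracket_arr:
--         team = ''
--         for c in entry:
--             if c == '(' or c == '[':
--                 break
--             team += c
--         former_teams.add(team.strip())
--
--     return set(filter(None, former_teams))
-- ===== SOURCE B (Python) =====
-- def parse_player_former_teams(former_team_text: str) -> set[str]:
--     # One left-to-right pass: a state machine instead of split-then-truncate.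
--     result = []
--     team = ''
--     collecting = True
--     for c in former_team_text:
--         if c == ']':
--             result.append(team.strip())
--             team = ''
--             collecting = True
--         elif c == '(' or c == '[':
--             collecting = False
--         elif collecting:
--             team += c
--     result.append(team.strip())
--     return set(filter(None, result))
-- ===== Notes on version B (the rewrite author's own statement) =====
-- stated objective: alternative
-- what changed: Replaced split-on-closing-bracket plus an inner break-loop per segment with a single left-to-right state-machine pass maintaining a buffer and a collecting flag.
import Mathlib
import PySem

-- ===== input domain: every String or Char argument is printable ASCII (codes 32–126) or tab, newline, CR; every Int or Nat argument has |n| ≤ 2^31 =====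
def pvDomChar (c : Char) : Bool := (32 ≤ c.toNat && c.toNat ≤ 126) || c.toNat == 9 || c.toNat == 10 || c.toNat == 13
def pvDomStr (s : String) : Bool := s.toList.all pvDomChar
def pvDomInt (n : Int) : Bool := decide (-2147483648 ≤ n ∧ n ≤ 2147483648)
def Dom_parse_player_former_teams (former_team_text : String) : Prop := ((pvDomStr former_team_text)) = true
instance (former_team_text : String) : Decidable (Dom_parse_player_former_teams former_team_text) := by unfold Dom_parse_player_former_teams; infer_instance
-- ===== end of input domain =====

-- B replaces A's split-plus-inner-break-loop with one state-machine pass over the text; same result set (alternative decomposition, no speed claim).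

-- ===== PORT A =====
-- inner loop 'for c in entry: if c=='(' or c=='[': break; team += c'
def pvTeamA : List Char → List Char → List Char
  | [], team => team
  | c :: cs, team => if c = '(' ∨ c = '[' then team else pvTeamA cs (team ++ [c])

def parse_player_former_teams (former_team_text : String) : List String :=
  let split_by_bracket_arr := PySem.Chars.splitOn former_team_text.toList [']']
  let former_teams := split_by_bracket_arr.foldl
    (fun acc entry => PySem.Set.add acc (String.ofList (PySem.Chars.strip (pvTeamA entry []))))
    PySem.Set.empty
  PySem.Set.ofList (former_teams.filter (fun t => t ≠ ""))

-- ===== PORT B =====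
-- one pass: state = (team buffer, collecting flag, completed segments)
def pvStepB (st : List Char × Bool × List String) (c : Char) : List Char × Bool × List String :=
  if c = ']' then ([], true, st.2.2 ++ [String.ofList (PySem.Chars.strip st.1)])
  else if c = '(' ∨ c = '[' then (st.1, false, st.2.2)
  else if st.2.1 then (st.1 ++ [c], st.2.1, st.2.2)
  else st

def parse_player_former_teams_alt (former_team_text : String) : List String :=
  let st := former_team_text.toList.foldl pvStepB ([], true, [])
  let result := st.2.2 ++ [String.ofList (PySem.Chars.strip st.1)]
  PySem.Set.ofList (result.filter (fun t => t ≠ ""))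

-- ===== PRECONDITION & SPEC =====
def Spec_parse_player_former_teams (former_team_text : String) (out : List String) : Prop := out = parse_player_former_teams_alt former_team_text
instance (former_team_text : String) (out : List String) : Decidable (Spec_parse_player_former_teams former_team_text out) := by unfold Spec_parse_player_former_teams; infer_instance

-- ===== CLAIM (what is proved, stated in full; the proofs are below) =====
def Claim_equal_parse_player_former_teams : Prop := ∀ (former_team_text : String), Dom_parse_player_former_teams former_team_text → Spec_parse_player_former_teams former_team_text (parse_player_former_teams former_team_text)

-- ===== LEMMAS AND PROOFS =====

-- helper: A's split-by-']' as a simple structural recursion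
def pvSplit1 : List Char → List (List Char)
  | [] => [[]]
  | c :: rest => if c = ']' then [] :: pvSplit1 rest else (pvSplit1 rest).modifyHead (fun p => c :: p)

def pvF (e : List Char) : String := String.ofList (PySem.Chars.strip (pvTeamA e []))

theorem pvSplit1_ne_nil (l : List Char) : pvSplit1 l ≠ [] := by
  cases l with
  | nil => simp [pvSplit1]
  | cons c rest =>
    simp only [pvSplit1]
    split
    · simp
    · cases h : pvSplit1 rest with
      | nil => exact absurd h (pvSplit1_ne_nil rest)
      | cons p ps => simp

theorem pvGo_char : ∀ (fuel : Nat) (l cur : List Char) (acc : List (List Char)),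
    l.length < fuel →
    PySem.Chars.splitOn.go [']'] fuel l cur acc
      = acc.reverse ++ (pvSplit1 l).modifyHead (fun p => cur.reverse ++ p) := by
  intro fuel
  induction fuel with
  | zero => intro l cur acc h; omega
  | succ fuel ih =>
    intro l cur acc h
    cases l with
    | nil => simp [PySem.Chars.splitOn.go, pvSplit1]
    | cons c rest =>
      by_cases hc : c = ']'
      · subst hc
        have hpre : List.isPrefixOf [']'] (']' :: rest) = true := by simp [List.isPrefixOf]
        simp only [PySem.Chars.splitOn.go, hpre, if_pos, pvSplit1, List.length_cons,
          List.length_nil, List.drop_succ_cons, List.drop_zero]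
        rw [ih rest [] (cur.reverse :: acc) (by simpa using Nat.lt_of_succ_lt_succ h)]
        cases pvSplit1 rest <;> simp
      · have hpre : List.isPrefixOf [']'] (c :: rest) = false := by
          simp [List.isPrefixOf]
          exact fun h => hc h.symm
        simp only [PySem.Chars.splitOn.go, hpre, Bool.false_eq_true, if_false, pvSplit1, hc]
        rw [ih rest (c :: cur) acc (by simpa using Nat.lt_of_succ_lt_succ h)]
        obtain ⟨p, ps, hp⟩ : ∃ p ps, pvSplit1 rest = p :: ps := by
          cases hh : pvSplit1 rest with
          | nil => exact absurd hh (pvSplit1_ne_nil rest)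
          | cons p ps => exact ⟨p, ps, rfl⟩
        simp [hp]

theorem pvSplitOn_char (l : List Char) : PySem.Chars.splitOn l [']'] = pvSplit1 l := by
  have h := pvGo_char (l.length + 1) l [] [] (by omega)
  obtain ⟨p, ps, hp⟩ : ∃ p ps, pvSplit1 l = p :: ps := by
    cases hh : pvSplit1 l with
    | nil => exact absurd hh (pvSplit1_ne_nil l)
    | cons p ps => exact ⟨p, ps, rfl⟩
  simpa [PySem.Chars.splitOn, hp] using h

theorem pvTeamA_acc (cs : List Char) : ∀ acc, pvTeamA cs acc = acc ++ pvTeamA cs [] := by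
  induction cs with
  | nil => intro acc; simp [pvTeamA]
  | cons c rest ih =>
    intro acc
    simp only [pvTeamA]
    split
    · simp
    · rw [ih (acc ++ [c]), ih ([] ++ [c])]; simp

-- the scan invariant: running B's loop from state (team, coll, out) over l
theorem pvScan (l : List Char) : ∀ (team : List Char) (coll : Bool) (out : List String),
    (let st := l.foldl pvStepB (team, coll, out)
     st.2.2 ++ [String.ofList (PySem.Chars.strip st.1)])
      = out ++ (String.ofList (PySem.Chars.strip
            (team ++ (if coll then pvTeamA (pvSplit1 l).head! [] else [])))
          :: ((pvSplit1 l).tail.map pvF)) := by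
  induction l with
  | nil => intro team coll out; cases coll <;> simp [pvSplit1, pvTeamA]
  | cons c rest ih =>
    intro team coll out
    obtain ⟨p, ps, hp⟩ : ∃ p ps, pvSplit1 rest = p :: ps := by
      cases hh : pvSplit1 rest with
      | nil => exact absurd hh (pvSplit1_ne_nil rest)
      | cons p ps => exact ⟨p, ps, rfl⟩
    by_cases hc : c = ']'
    · subst hc
      rw [List.foldl_cons,
        show pvStepB (team, coll, out) ']'
            = ([], true, out ++ [String.ofList (PySem.Chars.strip team)]) from by simp [pvStepB]]
      rw [ih [] true (out ++ [String.ofList (PySem.Chars.strip team)])]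
      simp [pvSplit1, hp, pvF, pvTeamA]
    · by_cases hb : c = '(' ∨ c = '['
      · rw [List.foldl_cons,
          show pvStepB (team, coll, out) c = (team, false, out) from by
            simp [pvStepB, hc, hb]]
        rw [ih team false out]
        have hteam : pvTeamA (c :: p) [] = [] := by
          simp only [pvTeamA, if_pos hb]
        simp [pvSplit1, if_neg hc, hp, hteam]
      · cases coll with
        | false =>
          rw [List.foldl_cons,
            show pvStepB (team, false, out) c = (team, false, out) from by
              simp [pvStepB, hc, hb]]
          rw [ih team false out]
          simp [pvSplit1, if_neg hc, hp]
        | true =>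
          rw [List.foldl_cons,
            show pvStepB (team, true, out) c = (team ++ [c], true, out) from by
              simp [pvStepB, hc, hb]]
          rw [ih (team ++ [c]) true out]
          have hteam : pvTeamA (c :: p) [] = [c] ++ pvTeamA p [] := by
            simp only [pvTeamA, if_neg hb]
            exact pvTeamA_acc p [c]
          simp [pvSplit1, if_neg hc, hp, hteam]

-- B's result list is the per-segment map
theorem pvResult_eq (l : List Char) :
    (let st := l.foldl pvStepB ([], true, [])
     st.2.2 ++ [String.ofList (PySem.Chars.strip st.1)])
      = (pvSplit1 l).map pvF := by
  rw [pvScan l [] true []]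
  obtain ⟨p, ps, hp⟩ : ∃ p ps, pvSplit1 l = p :: ps := by
    cases hh : pvSplit1 l with
    | nil => exact absurd hh (pvSplit1_ne_nil l)
    | cons p ps => exact ⟨p, ps, rfl⟩
  simp [hp, pvF]

-- filtering commutes with first-occurrence dedup
theorem pvOfList_filter (p : String → Bool) (L : List String) :
    (PySem.Set.ofList L).filter p = PySem.Set.ofList (L.filter p) := by
  induction L with
  | nil => rfl
  | cons x L ih =>
    rw [PySem.Set.ofList_cons]
    by_cases hx : p x = true
    · have hRHS : PySem.Set.ofList (List.filter p (x :: L))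
          = x :: PySem.Set.discard (PySem.Set.ofList (List.filter p L)) x := by
        rw [List.filter_cons_of_pos hx, PySem.Set.ofList_cons]
      rw [hRHS, ← ih, List.filter_cons_of_pos hx]
      congr 1
      simp [PySem.Set.discard, List.filter_filter, Bool.and_comm]
    · have hRHS : PySem.Set.ofList (List.filter p (x :: L))
          = PySem.Set.ofList (List.filter p L) := by
        rw [List.filter_cons_of_neg (by simpa using hx)]
      rw [hRHS, ← ih, List.filter_cons_of_neg (by simpa using hx)]
      simp only [PySem.Set.discard, List.filter_filter]
      apply List.filter_congr
      intro y hy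
      by_cases hyx : y = x
      · subst hyx; simp [hx]
      · simp [hyx]


-- ===== VERDICT (by name: the statement is the Claim_ definition above) =====
theorem parse_player_former_teams_spec : Claim_equal_parse_player_former_teams := by
  intro s _
  show parse_player_former_teams s = parse_player_former_teams_alt s
  unfold parse_player_former_teams parse_player_former_teams_alt
  simp only []
  rw [pvSplitOn_char]
  have hA : (pvSplit1 s.toList).foldl
      (fun acc entry => PySem.Set.add acc (String.ofList (PySem.Chars.strip (pvTeamA entry []))))
      PySem.Set.empty
      = PySem.Set.ofList ((pvSplit1 s.toList).map pvF) := by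
    rw [show (fun acc entry => PySem.Set.add acc (String.ofList (PySem.Chars.strip (pvTeamA entry []))))
        = (fun (acc : PySem.Set String) entry => PySem.Set.add acc (pvF entry)) from by
      funext a e; rw [pvF]]
    rw [← PySem.Set.update_map_eq_foldl_add (f := pvF) (s := PySem.Set.empty),
      PySem.Set.update_empty]
  rw [hA, pvOfList_filter, PySem.Set.ofList_ofList, pvResult_eq s.toList]
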